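-- pv_equiv track=rewrite | github.com/JupiLogy/much-hanoi | utils/state_properties.py | validate_state
-- ===== SOURCE A (Python) =====
-- def num_discs(state):
--     return(max(max(state)))
--
-- def validate_state(state, godmode=False):
--     if not godmode:
--         for lis in state:
--             if sorted(lis, reverse=True)!=lis:
--                 return False
--     flatstate = [disc for peg in state for disc in peg]
--     if not (set(range(1,num_discs(state)+1)) == set(flatstate)\
--             and len(flatstate) == len(set(flatstate))):
--         return False
--     return True
-- ===== SOURCE B (Python) =====
-- def validate_state(state, godmode=False):
--     flat = [disc for peg in state for disc in peg]
--     n = len(flat)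
--     if not godmode:
--         for peg in state:
--             if any(b >= a for a, b in zip(peg, peg[1:])):
--                 return False
--     seen = [False] * (n + 1)
--     for d in flat:
--         if d < 1 or d > n or seen[d]:
--             return False
--         seen[d] = True
--     return True
-- ===== Notes on version B (the rewrite author's own statement) =====
-- stated objective: alternative
-- what changed: B replaces A's per-peg sort plus set(range)/set(flat) construction with a single linear pass: an adjacent-pairs strict-descent check and a boolean marking array that verifies the discs are exactly a permutation of 1..n.
-- intended difference: When godmode is true, the discs are a permutation of 1..n, and the peg holding the largest disc n does not have the largest first element, A's num_discs = max(max(state)) picks the wrong peg and A wrongly returns False; B returns True, the intended answer since the state is a valid godmode state. — e.g. on validate_state([[1, 3], [2]], true): A returns false, B returns true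
-- crash fix: A raises ValueError (max of an empty sequence) when every peg is empty (including state == []); B returns True there, the natural answer for a vacuously valid state. — e.g. on validate_state([[]], false): A raises ValueError, B returns true
import Mathlib
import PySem

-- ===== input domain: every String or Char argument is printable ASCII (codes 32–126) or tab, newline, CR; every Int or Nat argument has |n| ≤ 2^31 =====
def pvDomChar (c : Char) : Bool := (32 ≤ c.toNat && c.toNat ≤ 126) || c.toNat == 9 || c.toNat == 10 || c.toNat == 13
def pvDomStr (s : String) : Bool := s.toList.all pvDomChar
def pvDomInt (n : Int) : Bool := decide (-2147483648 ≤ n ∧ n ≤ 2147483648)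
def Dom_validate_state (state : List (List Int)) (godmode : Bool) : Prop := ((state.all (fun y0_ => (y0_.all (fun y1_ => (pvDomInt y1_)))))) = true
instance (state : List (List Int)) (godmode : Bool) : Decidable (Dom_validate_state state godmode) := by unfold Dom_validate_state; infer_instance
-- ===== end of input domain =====

-- B is a single linear pass (strict-descent adjacency check + boolean marking array) instead of
-- A's per-peg sort and set constructions; B fixes A's num_discs = max(max(state)) slip (see D_).

-- ===== PORT A =====
def num_discs (state : List (List Int)) : Option Int :=
  -- max(max(state)): lexicographically largest peg, then its largest disc; none = ValueError
  match PySem.List.max? state (fun x => x) with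
  | none => none
  | some p => PySem.List.max? p (fun x => x)

def validate_state (state : List (List Int)) (godmode : Bool) : Bool :=
  if !godmode && state.any (fun lis => PySem.List.sorted lis (fun x => x) true != lis) then
    false
  else
    let flatstate := state.flatMap (fun peg => peg)
    match num_discs state with
    | none => false   -- Python raises ValueError here; excluded by Pre_validate_state
    | some nd =>
      if !(PySem.Set.equal (PySem.Set.ofList (PySem.List.pyRange 1 (nd + 1) 1))
             (PySem.Set.ofList flatstate)
           && PySem.List.len flatstate == PySem.Set.len (PySem.Set.ofList flatstate)) then
        false
      else
        true

-- ===== PORT B =====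
-- the marking loop: 'for d in flat: if d < 1 or d > n or seen[d]: return False; seen[d] = True'
def altMark (n : Int) (seen : List Bool) : List Int → Bool
  | [] => true
  | d :: rest =>
      if decide (d < 1) || decide (n < d) || PySem.List.pyGetD seen d false then false
      else altMark n (PySem.List.pySetD seen d true) rest

def validate_state_alt (state : List (List Int)) (godmode : Bool) : Bool :=
  let flat := state.flatMap (fun peg => peg)
  let n := PySem.List.len flat
  if !godmode && state.any (fun peg =>
      (peg.zip (PySem.List.slice peg (some 1) none)).any (fun p => decide (p.2 ≥ p.1))) then
    false
  else
    altMark n (PySem.List.pyRepeat [false] (n + 1)) flat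

-- ===== PRECONDITION & SPEC =====
-- Pre_ excludes exactly the inputs where A raises ValueError: every peg empty (incl. state = []).
def Pre_validate_state (state : List (List Int)) (godmode : Bool) : Prop :=
  ∃ l ∈ state, l ≠ []
instance (state : List (List Int)) (godmode : Bool) : Decidable (Pre_validate_state state godmode) := by
  unfold Pre_validate_state; infer_instance
def pvWitness_validate_state : List (List Int) × Bool := ([[3, 2], [1], []], false)

-- When godmode is true, the discs are a permutation of 1..n, and the peg holding the largest disc n
-- does not have the largest first element, A's num_discs = max(max(state)) picks the wrong peg and A
-- wrongly returns False; B returns True, the intended answer for a valid godmode state.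
def D_validate_state (state : List (List Int)) (godmode : Bool) : Prop :=
  godmode = true ∧
  state.flatten.Perm (PySem.List.pyRange 1 (state.flatten.length + 1) 1) ∧
  (∀ p ∈ state, (state.flatten.length : Int) ∈ p →
      ∃ q ∈ state, q ≠ [] ∧ p.headD 0 < q.headD 0)
instance (state : List (List Int)) (godmode : Bool) : Decidable (D_validate_state state godmode) := by
  unfold D_validate_state; infer_instance

def Spec_validate_state (state : List (List Int)) (godmode : Bool) (out : Bool) : Prop :=
  ¬ D_validate_state state godmode → out = validate_state_alt state godmode
instance (state : List (List Int)) (godmode : Bool) (out : Bool) : Decidable (Spec_validate_state state godmode out) := by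
  unfold Spec_validate_state; infer_instance

def pvDiffWitness_validate_state : List (List Int) × Bool := ([[1, 3], [2]], true)
def pvDiffWitnessOut_validate_state : Bool × Bool := (false, true)

-- A raises ValueError (max() of an empty sequence) when every peg is empty; B returns True there.
def Raises_validate_state (state : List (List Int)) (godmode : Bool) : Prop :=
  ∀ l ∈ state, l = []
instance (state : List (List Int)) (godmode : Bool) : Decidable (Raises_validate_state state godmode) := by
  unfold Raises_validate_state; infer_instance
def pvRaiseWitness_validate_state : List (List Int) × Bool := ([[]], false)
def pvRaiseWitnessOut_validate_state : Bool := true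

-- ===== CLAIM (what is proved, stated in full; the proofs are below) =====
def Claim_unchanged_validate_state : Prop := ∀ (state : List (List Int)) (godmode : Bool), Dom_validate_state state godmode → Pre_validate_state state godmode → Spec_validate_state state godmode (validate_state state godmode)
def Claim_changed_validate_state : Prop := Dom_validate_state (pvDiffWitness_validate_state.1) (pvDiffWitness_validate_state.2) ∧ Pre_validate_state (pvDiffWitness_validate_state.1) (pvDiffWitness_validate_state.2) ∧ D_validate_state (pvDiffWitness_validate_state.1) (pvDiffWitness_validate_state.2) ∧ validate_state (pvDiffWitness_validate_state.1) (pvDiffWitness_validate_state.2) = pvDiffWitnessOut_validate_state.1 ∧ validate_state_alt (pvDiffWitness_validate_state.1) (pvDiffWitness_validate_state.2) = pvDiffWitnessOut_validate_state.2 ∧ pvDiffWitnessOut_validate_state.1 ≠ pvDiffWitnessOut_validate_state.2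
def Claim_exact_validate_state : Prop := ∀ (state : List (List Int)) (godmode : Bool), Dom_validate_state state godmode → Pre_validate_state state godmode → D_validate_state state godmode → validate_state state godmode ≠ validate_state_alt state godmode
def Claim_raises_validate_state : Prop := (∀ (state : List (List Int)) (godmode : Bool), Dom_validate_state state godmode → Raises_validate_state state godmode → ¬ Pre_validate_state state godmode) ∧ (Dom_validate_state (pvRaiseWitness_validate_state.1) (pvRaiseWitness_validate_state.2) ∧ Raises_validate_state (pvRaiseWitness_validate_state.1) (pvRaiseWitness_validate_state.2) ∧ validate_state_alt (pvRaiseWitness_validate_state.1) (pvRaiseWitness_validate_state.2) = pvRaiseWitnessOut_validate_state)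

-- ===== LEMMAS AND PROOFS =====

theorem getD_set_bool (seen : List Bool) (i e : Nat) (h : i < seen.length) :
    (seen.set i true).getD e false = if e = i then true else seen.getD e false := by
  rcases eq_or_ne e i with rfl | hne
  · simp [List.getD, h]
  · simp [List.getD, List.getElem?_set_ne (Ne.symm hne), hne]

theorem altMark_true_iff (n : Int) (xs : List Int) (seen : List Bool)
    (hlen : seen.length = n.toNat + 1) :
    (altMark n seen xs = true ↔
      xs.Nodup ∧ ∀ d ∈ xs, 1 ≤ d ∧ d ≤ n ∧ seen.getD d.toNat false = false) := by
  induction xs generalizing seen with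
  | nil => simp [altMark]
  | cons d rest ih =>
    by_cases h1 : d < 1
    · simp [altMark, h1]
    · by_cases h2 : n < d
      · simp [altMark, h1, h2]
      · have hd0 : (0:Int) ≤ d := by omega
        have hdn : d.toNat < seen.length := by rw [hlen]; omega
        have hget : PySem.List.pyGetD seen d false = seen.getD d.toNat false :=
          PySem.List.pyGetD_of_nonneg seen false hd0
        have hset : PySem.List.pySetD seen d true = seen.set d.toNat true :=
          PySem.List.pySetD_of_nonneg seen true hd0
        have hstep : altMark n seen (d :: rest) =
            if seen.getD d.toNat false then false
            else altMark n (seen.set d.toNat true) rest := by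
          simp [altMark, h1, h2, hget, hset]
        by_cases hseen : seen.getD d.toNat false = true
        · rw [hstep, hseen]
          simp only [if_true]
          constructor
          · intro h; exact absurd h (by simp)
          · rintro ⟨_, hall⟩
            have := (hall d (by simp)).2.2
            rw [hseen] at this; exact absurd this (by simp)
        · have hseen' : seen.getD d.toNat false = false := Bool.eq_false_iff.mpr hseen
          rw [hstep, hseen']
          simp only [Bool.false_eq_true, if_false]
          rw [ih _ (by simp [hlen])]
          constructor
          · rintro ⟨hnd, hall⟩
            refine ⟨List.nodup_cons.mpr ⟨?_, hnd⟩, ?_⟩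
            · intro hmem
              have h3 := (hall d hmem).2.2
              rw [getD_set_bool seen d.toNat d.toNat hdn, if_pos rfl] at h3
              exact absurd h3 (by simp)
            · intro e he
              rcases List.mem_cons.mp he with rfl | he'
              · exact ⟨by omega, by omega, hseen'⟩
              · obtain ⟨he1, he2, he3⟩ := hall e he'
                refine ⟨he1, he2, ?_⟩
                rw [getD_set_bool seen d.toNat e.toNat hdn] at he3
                rcases eq_or_ne e.toNat d.toNat with heq | hne
                · rw [if_pos heq] at he3; exact absurd he3 (by simp)
                · rwa [if_neg hne] at he3
          · rintro ⟨hnd, hall⟩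
            obtain ⟨hdni, hnd'⟩ := List.nodup_cons.mp hnd
            refine ⟨hnd', ?_⟩
            intro e he
            obtain ⟨he1, he2, he3⟩ := hall e (List.mem_cons_of_mem _ he)
            have hne : e.toNat ≠ d.toNat := by
              intro heq
              have : e = d := by omega
              subst this; exact hdni he
            exact ⟨he1, he2, by rw [getD_set_bool seen d.toNat e.toNat hdn, if_neg hne]; exact he3⟩

theorem zip_desc_iff (peg : List Int) :
    ((peg.zip (PySem.List.slice peg (some 1) none)).any fun p => decide (p.2 ≥ p.1)) = false ↔
      peg.Pairwise (· > ·) := by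
  rw [PySem.List.slice_from_one]
  rw [← List.isChain_iff_pairwise]
  induction peg with
  | nil => simp
  | cons a t ih =>
    cases t with
    | nil => simp
    | cons b u =>
      simp only [List.tail_cons, List.zip_cons_cons, List.any_cons, Bool.or_eq_false_iff,
        decide_eq_false_iff_not, not_le] at *
      rw [List.isChain_cons_cons]
      constructor
      · rintro ⟨h1, h2⟩; exact ⟨h1, ih.mp h2⟩
      · rintro ⟨h1, h2⟩; exact ⟨h1, ih.mpr h2⟩

theorem B_true_iff (state : List (List Int)) (godmode : Bool) :
    (validate_state_alt state godmode = true ↔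
      (godmode = false → ∀ peg ∈ state, peg.Pairwise (· > ·)) ∧
      (state.flatMap (fun peg => peg)).Nodup ∧
      (∀ d ∈ state.flatMap (fun peg => peg),
        1 ≤ d ∧ d ≤ ((state.flatMap (fun peg => peg)).length : Int))) := by
  unfold validate_state_alt
  set flat := state.flatMap (fun peg => peg) with hflat
  have hrep : PySem.List.pyRepeat [false] (PySem.List.len flat + 1) =
      List.replicate (flat.length + 1) false := by
    have h1 : (PySem.List.len flat + 1).toNat = flat.length + 1 := by
      rw [PySem.List.len_eq]; omega
    rw [PySem.List.pyRepeat_singleton, h1]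
  have hmark : (altMark (PySem.List.len flat)
      (PySem.List.pyRepeat [false] (PySem.List.len flat + 1)) flat = true ↔
      flat.Nodup ∧ ∀ d ∈ flat, 1 ≤ d ∧ d ≤ (flat.length : Int)) := by
    rw [hrep, PySem.List.len_eq, altMark_true_iff _ _ _ (by simp)]
    constructor
    · rintro ⟨h1, h2⟩
      exact ⟨h1, fun d hd => ⟨(h2 d hd).1, (h2 d hd).2.1⟩⟩
    · rintro ⟨h1, h2⟩
      refine ⟨h1, fun d hd => ⟨(h2 d hd).1, (h2 d hd).2, ?_⟩⟩
      simp [List.getD]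
  cases godmode with
  | true =>
    simp only [Bool.not_true, Bool.false_and, Bool.false_eq_true, if_false]
    rw [hmark]
    simp
  | false =>
    simp only [Bool.not_false, Bool.true_and]
    by_cases hany : (state.any fun peg =>
        (peg.zip (PySem.List.slice peg (some 1) none)).any fun p => decide (p.2 ≥ p.1)) = true
    · rw [if_pos hany]
      constructor
      · intro h; exact absurd h (by simp)
      · rintro ⟨hdesc, _⟩
        obtain ⟨peg, hpeg, hbad⟩ := List.any_eq_true.mp hany
        exact absurd ((zip_desc_iff peg).mpr (hdesc (by trivial) peg hpeg)) (by simp [hbad])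
    · rw [if_neg hany, hmark]
      have hdesc : ∀ peg ∈ state, peg.Pairwise (· > ·) := by
        intro peg hpeg
        rw [← zip_desc_iff]
        by_contra hbad
        exact hany (List.any_eq_true.mpr ⟨peg, hpeg, by simpa using hbad⟩)
      constructor
      · rintro ⟨h1, h2⟩; exact ⟨fun _ => hdesc, h1, h2⟩
      · rintro ⟨_, h1, h2⟩; exact ⟨h1, h2⟩

theorem sortcheck_iff (state : List (List Int)) :
    ((state.any fun lis => PySem.List.sorted lis (fun x => x) true != lis) = false ↔
      ∀ lis ∈ state, lis.Pairwise (· ≥ ·)) := by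
  rw [Bool.eq_false_iff, Ne, List.any_eq_true]
  push Not
  constructor
  · intro h lis hlis
    have h2 := h lis hlis
    have h3 : PySem.List.sorted lis (fun x => x) true = lis := by
      by_contra hne
      exact absurd (by simp [bne_iff_ne, hne] : (PySem.List.sorted lis (fun x => x) true != lis) = true) (by simp [h2])
    have := PySem.List.sorted_pairwise_rev lis (fun x : Int => x)
    rw [h3] at this
    exact this.imp (fun hab => hab)
  · intro h lis hlis
    have h3 : PySem.List.sorted lis (fun x => x) true = lis :=
      PySem.List.sorted_rev_eq_self_of_pairwise lis (fun x => x) ((h lis hlis).imp (fun hab => hab))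
    simp [h3]

theorem ofList_sublist {α : Type} [BEq α] [LawfulBEq α] (xs : List α) :
    (PySem.Set.ofList xs).Sublist xs := by
  induction xs using List.reverseRecOn with
  | nil => simp [PySem.Set.ofList_nil]
  | append_singleton ys y ih =>
    rw [PySem.Set.ofList_append_singleton, PySem.Set.add_eq_ite]
    split_ifs with hmem
    · exact ih.trans (List.sublist_append_left ys [y])
    · exact ih.append (List.Sublist.refl [y])

theorem len_check_iff (xs : List Int) :
    ((PySem.List.len xs == PySem.Set.len (PySem.Set.ofList xs)) = true ↔ xs.Nodup) := by
  rw [beq_iff_eq, PySem.List.len_eq, show PySem.Set.len (PySem.Set.ofList xs) = PySem.List.len (PySem.Set.ofList xs) from rfl, PySem.List.len_eq]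
  constructor
  · intro h
    have hlen : (PySem.Set.ofList xs).length = xs.length := by exact_mod_cast h.symm
    have heq : PySem.Set.ofList xs = xs := (ofList_sublist xs).eq_of_length hlen
    rw [← heq]
    exact PySem.Set.nodup_ofList xs
  · intro h
    rw [PySem.Set.ofList_eq_self_of_nodup xs h]

theorem A_core_iff (state : List (List Int)) :
    ((match num_discs state with
      | none => false
      | some nd =>
        if !(PySem.Set.equal (PySem.Set.ofList (PySem.List.pyRange 1 (nd + 1) 1))
               (PySem.Set.ofList (state.flatMap (fun peg => peg)))
             && PySem.List.len (state.flatMap (fun peg => peg))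
                  == PySem.Set.len (PySem.Set.ofList (state.flatMap (fun peg => peg)))) then
          false
        else true) = true ↔
      ∃ nd, num_discs state = some nd ∧
        (∀ x : Int, x ∈ state.flatMap (fun peg => peg) ↔ 1 ≤ x ∧ x < nd + 1) ∧
        (state.flatMap (fun peg => peg)).Nodup) := by
  cases hnum : num_discs state with
  | none => simp
  | some nd =>
    dsimp only
    rw [show ∀ b : Bool, (if !b then false else true) = b from by decide]
    rw [Bool.and_eq_true]
    constructor
    · rintro ⟨h1, h2⟩
      refine ⟨nd, rfl, ?_, (len_check_iff _).mp h2⟩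
      intro x
      have := (PySem.Set.equal_iff _ _).mp h1 x
      rw [PySem.Set.mem_ofList, PySem.Set.mem_ofList, PySem.List.mem_pyRange_one] at this
      exact this.symm.trans (Iff.rfl)
    · rintro ⟨nd', hnd', hiff, hnodup⟩
      have : nd' = nd := by injection hnd' with h; omega
      subst this
      refine ⟨(PySem.Set.equal_iff _ _).mpr ?_, (len_check_iff _).mpr hnodup⟩
      intro x
      rw [PySem.Set.mem_ofList, PySem.Set.mem_ofList, PySem.List.mem_pyRange_one]
      exact (hiff x).symm

theorem A_true_iff (state : List (List Int)) (godmode : Bool) :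
    (validate_state state godmode = true ↔
      (godmode = false → ∀ lis ∈ state, lis.Pairwise (· ≥ ·)) ∧
      (∃ nd, num_discs state = some nd ∧
        (∀ x : Int, x ∈ state.flatMap (fun peg => peg) ↔ 1 ≤ x ∧ x < nd + 1) ∧
        (state.flatMap (fun peg => peg)).Nodup)) := by
  unfold validate_state
  cases godmode with
  | true =>
    simp only [Bool.not_true, Bool.false_and, Bool.false_eq_true, if_false]
    rw [A_core_iff]
    simp
  | false =>
    simp only [Bool.not_false, Bool.true_and]
    by_cases hany : (state.any fun lis => PySem.List.sorted lis (fun x => x) true != lis) = true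
    · rw [if_pos hany]
      constructor
      · intro h; exact absurd h (by simp)
      · rintro ⟨hdesc, _⟩
        have := (sortcheck_iff state).mpr (hdesc (by trivial))
        rw [this] at hany
        exact absurd hany (by simp)
    · rw [if_neg hany, A_core_iff]
      have hdesc : ∀ lis ∈ state, lis.Pairwise (· ≥ ·) :=
        (sortcheck_iff state).mp (Bool.eq_false_iff.mpr hany)
      constructor
      · intro h; exact ⟨fun _ => hdesc, h⟩
      · rintro ⟨_, h⟩; exact h

theorem max?_irrel (xs : List (List Int)) :
    PySem.List.max? xs (fun x => x) =
    @PySem.List.max? (List Int) (List Int) List.instLinearOrder.toLT LinearOrder.toDecidableLT xs (fun x => x) := by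
  have h : (fun (a b : List Int) => a.decidableLT b) = (LinearOrder.toDecidableLT : DecidableLT (List Int)) :=
    Subsingleton.elim _ _
  exact congrFun (congrFun (congrArg _ h) xs) _

theorem cons_le_head {a b : Int} {l m : List Int} (h : (a :: l : List Int) ≤ (b :: m)) : a ≤ b := by
  by_contra hab
  exact absurd h (not_le.mpr (List.cons_lt_cons_iff.mpr (Or.inl (by omega))))

theorem peg_unique {s : List (List Int)} (h : s.flatten.Nodup) {p q : List Int} {x : Int}
    (hp : p ∈ s) (hq : q ∈ s) (hxp : x ∈ p) (hxq : x ∈ q) : p = q := by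
  induction s with
  | nil => cases hp
  | cons hd tl ih =>
    rw [List.flatten_cons, List.nodup_append] at h
    rcases List.mem_cons.mp hp with rfl | hp' <;> rcases List.mem_cons.mp hq with rfl | hq'
    · rfl
    · exact absurd rfl (h.2.2 x hxp x (List.mem_flatten.mpr ⟨q, hq', hxq⟩))
    · exact absurd rfl (h.2.2 x hxq x (List.mem_flatten.mpr ⟨p, hp', hxp⟩))
    · exact ih h.2.1 hp' hq'

theorem pigeon {xs : List Int} (hnd : xs.Nodup)
    (hb : ∀ d ∈ xs, 1 ≤ d ∧ d ≤ (xs.length : Int)) :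
    ∀ x : Int, 1 ≤ x → x ≤ (xs.length : Int) → x ∈ xs := by
  intro x h1 h2
  have hsub : xs.toFinset ⊆ Finset.Icc 1 (xs.length : Int) := by
    intro d hd
    exact Finset.mem_Icc.mpr (hb d (List.mem_toFinset.mp hd))
  have hcard : (Finset.Icc 1 (xs.length : Int)).card = xs.length := by
    rw [Int.card_Icc]; omega
  have heq : xs.toFinset = Finset.Icc 1 (xs.length : Int) :=
    Finset.eq_of_subset_of_card_le hsub
      (by rw [hcard, List.toFinset_card_of_nodup hnd])
  have : x ∈ xs.toFinset := heq ▸ Finset.mem_Icc.mpr ⟨h1, h2⟩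
  exact List.mem_toFinset.mp this

theorem num_discs_eq {state : List (List Int)} {p : List Int} {a n : Int}
    (hp : p ∈ state) (hhd : p.head? = some a) (hn : n ∈ p)
    (hmax : ∀ q ∈ state, ∀ b : Int, q.head? = some b → b ≤ a)
    (hnd : (state.flatMap (fun peg => peg)).Nodup)
    (hb : ∀ d ∈ state.flatMap (fun peg => peg), d ≤ n) :
    num_discs state = some n := by
  have hflat : state.flatMap (fun peg => peg) = state.flatten := List.flatMap_id'
  have hnd' : state.flatten.Nodup := hflat ▸ hnd
  obtain ⟨ph, pt, rfl⟩ : ∃ ph pt, p = ph :: pt := by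
    cases p with
    | nil => cases hhd
    | cons ph pt => exact ⟨ph, pt, rfl⟩
  have ha : ph = a := by injection hhd
  subst ha
  cases h1 : PySem.List.max? state (fun x => x) with
  | none =>
    rw [PySem.List.max?_eq_none_iff] at h1
    subst h1; cases hp
  | some m =>
    have hm_mem : m ∈ state := PySem.List.max?_mem h1
    have hle : ∀ q ∈ state, q ≤ m := by
      rw [max?_irrel] at h1
      exact fun q hq => PySem.List.max?_isMax h1 q hq
    have hpm : (ph :: pt : List Int) ≤ m := hle _ hp
    cases m with
    | nil => exact absurd hpm (not_le.mpr (List.nil_lt_cons ph pt))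
    | cons c mt =>
      have hca : c ≤ ph := hmax _ hm_mem c rfl
      have hac : ph ≤ c := cons_le_head hpm
      have hceq : c = ph := le_antisymm hca hac
      subst hceq
      have hpm_eq : (c :: pt : List Int) = c :: mt :=
        peg_unique hnd' hp hm_mem (List.mem_cons_self) (List.mem_cons_self)
      cases h2 : PySem.List.max? (c :: mt) (fun x => x) with
      | none => rw [PySem.List.max?_eq_none_iff] at h2; cases h2
      | some k =>
        have hk_mem : k ∈ (c :: mt : List Int) := PySem.List.max?_mem h2
        have hk_max : ∀ y ∈ (c :: mt : List Int), y ≤ k := fun y hy => PySem.List.max?_isMax h2 y hy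
        have hkn : k ≤ n := hb k (List.mem_flatMap.mpr ⟨c :: pt, hp, hpm_eq ▸ hk_mem⟩)
        have hnk : n ≤ k := hk_max n (hpm_eq ▸ hn)
        have : k = n := le_antisymm hkn hnk
        subst this
        unfold num_discs
        rw [h1]
        dsimp only
        exact h2

theorem D_iff (state : List (List Int)) (godmode : Bool) :
    (D_validate_state state godmode ↔
      godmode = true ∧
      (state.flatMap (fun peg => peg)).Nodup ∧
      (∀ d ∈ state.flatMap (fun peg => peg),
          1 ≤ d ∧ d ≤ ((state.flatMap (fun peg => peg)).length : Int)) ∧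
      (∀ p ∈ state, ((state.flatMap (fun peg => peg)).length : Int) ∈ p →
          ∃ q ∈ state, q ≠ [] ∧ p.headD 0 < q.headD 0)) := by
  unfold D_validate_state
  rw [← (List.flatMap_id' : state.flatMap (fun peg => peg) = state.flatten)]
  set flat := state.flatMap (fun peg => peg) with hflat
  have hpr : ∀ x : Int, x ∈ PySem.List.pyRange 1 ((flat.length : Int) + 1) 1 ↔
      1 ≤ x ∧ x ≤ (flat.length : Int) := by
    intro x
    rw [PySem.List.mem_pyRange_one]
    omega
  constructor
  · rintro ⟨hg, hperm, hheads⟩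
    have hnd : flat.Nodup := (hperm.nodup_iff).mpr (PySem.List.nodup_pyRange_one _ _)
    refine ⟨hg, hnd, ?_, hheads⟩
    intro d hd
    exact (hpr d).mp (hperm.mem_iff.mp hd)
  · rintro ⟨hg, hnd, hbounds, hheads⟩
    refine ⟨hg, ?_, hheads⟩
    rw [List.perm_ext_iff_of_nodup hnd (PySem.List.nodup_pyRange_one _ _)]
    intro x
    rw [hpr x]
    exact ⟨fun hx => hbounds x hx, fun ⟨h1, h2⟩ => pigeon hnd hbounds x h1 h2⟩

theorem main_equiv (state : List (List Int)) (godmode : Bool)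
    (hpre : Pre_validate_state state godmode)
    (hD : ¬ D_validate_state state godmode) :
    validate_state state godmode = validate_state_alt state godmode := by
  rw [show ∀ a b : Bool, a = b ↔ ((a = true) ↔ (b = true)) from by decide]
  rw [A_true_iff, B_true_iff]
  have hflat : state.flatMap (fun peg => peg) = state.flatten := List.flatMap_id'
  have hfne : state.flatMap (fun peg => peg) ≠ [] := by
    obtain ⟨l, hl, hlne⟩ := hpre
    intro hempty
    obtain ⟨x, hx⟩ := List.exists_mem_of_ne_nil l hlne
    exact absurd hempty (List.ne_nil_of_mem (List.mem_flatMap.mpr ⟨l, hl, hx⟩))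
  constructor
  · rintro ⟨hdesc, nd, hnum, hiff, hnd⟩
    -- flat is a permutation of range 1..nd, hence length = nd
    have hperm : (state.flatMap (fun peg => peg)).Perm (PySem.List.pyRange 1 (nd + 1) 1) := by
      rw [List.perm_ext_iff_of_nodup hnd (PySem.List.nodup_pyRange_one 1 (nd + 1))]
      intro x
      rw [PySem.List.mem_pyRange_one]
      exact hiff x
    have hlen : ((state.flatMap (fun peg => peg)).length : Int) = nd := by
      have h1 := hperm.length_eq
      rw [PySem.List.length_pyRange_one] at h1
      have hnd1 : 1 ≤ nd := by
        obtain ⟨x, hx⟩ := List.exists_mem_of_ne_nil _ hfne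
        have := (hiff x).mp hx
        omega
      omega
    have hbounds : ∀ d ∈ state.flatMap (fun peg => peg),
        1 ≤ d ∧ d ≤ ((state.flatMap (fun peg => peg)).length : Int) := by
      intro d hd
      have := (hiff d).mp hd
      omega
    refine ⟨?_, hnd, hbounds⟩
    intro hg peg hpeg
    have h1 : peg.Pairwise (· ≥ ·) := hdesc hg peg hpeg
    have h2 : peg.Nodup := (hflat ▸ hnd).sublist (List.sublist_flatten_of_mem hpeg)
    exact (h1.and h2).imp (fun ⟨hab, hne⟩ => lt_of_le_of_ne hab (Ne.symm hne))
  · rintro ⟨hdesc, hnd, hbounds⟩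
    set n : Int := ((state.flatMap (fun peg => peg)).length : Int) with hn
    have hn1 : 1 ≤ n := by
      obtain ⟨x, hx⟩ := List.exists_mem_of_ne_nil _ hfne
      have := List.length_pos_of_mem hx
      omega
    have hnmem : n ∈ state.flatMap (fun peg => peg) :=
      pigeon hnd hbounds n hn1 le_rfl
    obtain ⟨p, hp, hnp⟩ := List.mem_flatMap.mp hnmem
    -- find the head of p and show every head is ≤ it
    have hkey : ∃ a, p.head? = some a ∧ n ∈ p ∧
        ∀ q ∈ state, ∀ b : Int, q.head? = some b → b ≤ a := by
      cases hg : godmode with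
      | false =>
        obtain ⟨ph, pt, rfl⟩ : ∃ ph pt, p = ph :: pt := by
          cases p with
          | nil => cases hnp
          | cons ph pt => exact ⟨ph, pt, rfl⟩
        have hpw : (ph :: pt : List Int).Pairwise (· > ·) := hdesc hg _ hp
        have hphn : ph = n := by
          rcases List.mem_cons.mp hnp with rfl | hnt
          · rfl
          · have h1 : ph > n := (List.pairwise_cons.mp hpw).1 n hnt
            have h2 := (hbounds ph (List.mem_flatMap.mpr ⟨_, hp, List.mem_cons_self⟩)).2
            omega
        refine ⟨ph, rfl, hnp, ?_⟩
        intro q hq b hb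
        have hbmem : b ∈ state.flatMap (fun peg => peg) :=
          List.mem_flatMap.mpr ⟨q, hq, List.mem_of_mem_head? hb⟩
        have := (hbounds b hbmem).2
        omega
      | true =>
        by_contra hnone
        apply hD
        rw [D_iff]
        refine ⟨hg, hnd, hbounds, ?_⟩
        intro p' hp' hnp'
        have hpp' : p' = p := peg_unique (hflat ▸ hnd) hp' hp hnp' hnp
        subst hpp'
        obtain ⟨ph, pt, rfl⟩ : ∃ ph pt, p' = ph :: pt := by
          cases p' with
          | nil => cases hnp
          | cons ph pt => exact ⟨ph, pt, rfl⟩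
        by_contra hq
        push Not at hq
        apply hnone
        refine ⟨ph, rfl, hnp, ?_⟩
        intro q hqmem b hb
        obtain ⟨qh, qt, rfl⟩ : ∃ qh qt, q = qh :: qt := by
          cases q with
          | nil => cases hb
          | cons qh qt => exact ⟨qh, qt, rfl⟩
        have hbq : b = qh := by injection hb with h; omega
        subst hbq
        have := hq (b :: qt) hqmem (by simp)
        simpa using this
    obtain ⟨a, hhd, hnp', hmax⟩ := hkey
    have hnum : num_discs state = some n :=
      num_discs_eq hp hhd hnp' hmax hnd (fun d hd => (hbounds d hd).2)
    refine ⟨?_, n, hnum, ?_, hnd⟩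
    · intro hg peg hpeg
      exact (hdesc hg peg hpeg).imp (fun hab => le_of_lt hab)
    · intro x
      constructor
      · intro hx
        have := hbounds x hx
        omega
      · rintro ⟨h1, h2⟩
        exact pigeon hnd hbounds x h1 (by omega)

theorem exact_diff (state : List (List Int)) (godmode : Bool)
    (hpre : Pre_validate_state state godmode)
    (hD : D_validate_state state godmode) :
    validate_state state godmode ≠ validate_state_alt state godmode := by
  obtain ⟨hg, hnd, hbounds, hheads⟩ := (D_iff state godmode).mp hD
  have hflat : state.flatMap (fun peg => peg) = state.flatten := List.flatMap_id'
  have hfne : state.flatMap (fun peg => peg) ≠ [] := by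
    obtain ⟨l, hl, hlne⟩ := hpre
    intro hempty
    obtain ⟨x, hx⟩ := List.exists_mem_of_ne_nil l hlne
    exact absurd hempty (List.ne_nil_of_mem (List.mem_flatMap.mpr ⟨l, hl, hx⟩))
  have hB : validate_state_alt state godmode = true := by
    rw [B_true_iff]
    exact ⟨fun hgf => absurd (hg ▸ hgf) (by simp), hnd, hbounds⟩
  have hA : validate_state state godmode = false := by
    rw [Bool.eq_false_iff, Ne, A_true_iff]
    rintro ⟨_, nd, hnum, hiff, _⟩
    set n : Int := ((state.flatMap (fun peg => peg)).length : Int) with hn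
    have hn1 : 1 ≤ n := by
      obtain ⟨x, hx⟩ := List.exists_mem_of_ne_nil _ hfne
      have := List.length_pos_of_mem hx
      omega
    have hnmem : n ∈ state.flatMap (fun peg => peg) :=
      pigeon hnd hbounds n hn1 le_rfl
    obtain ⟨p, hp, hnp⟩ := List.mem_flatMap.mp hnmem
    cases h1 : PySem.List.max? state (fun x => x) with
    | none =>
      unfold num_discs at hnum
      rw [h1] at hnum
      cases hnum
    | some m =>
      have hm_mem : m ∈ state := PySem.List.max?_mem h1
      have hle : ∀ q ∈ state, q ≤ m := by
        rw [max?_irrel] at h1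
        exact fun q hq => PySem.List.max?_isMax h1 q hq
      have hnum' : PySem.List.max? m (fun x => x) = some nd := by
        unfold num_discs at hnum
        rw [h1] at hnum
        exact hnum
      have hnd_mem : nd ∈ m := PySem.List.max?_mem hnum'
      have hnd_flat : nd ∈ state.flatMap (fun peg => peg) :=
        List.mem_flatMap.mpr ⟨m, hm_mem, hnd_mem⟩
      have hndn : nd = n := by
        have h2 := (hbounds nd hnd_flat).2
        have h3 := (hiff n).mp hnmem
        omega
      subst hndn
      have hmp : m = p := peg_unique (hflat ▸ hnd) hm_mem hp hnd_mem hnp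
      subst hmp
      obtain ⟨q, hq, hqne, hlt⟩ := hheads m hp hnp
      have hqm : q ≤ m := hle q hq
      obtain ⟨qh, qt, rfl⟩ : ∃ qh qt, q = qh :: qt := by
        cases q with
        | nil => exact absurd rfl hqne
        | cons qh qt => exact ⟨qh, qt, rfl⟩
      obtain ⟨mh, mt, rfl⟩ : ∃ mh mt, m = mh :: mt := by
        cases m with
        | nil => cases hnd_mem
        | cons mh mt => exact ⟨mh, mt, rfl⟩
      have h4 : qh ≤ mh := cons_le_head hqm
      simp only [List.headD_cons] at hlt
      omega
  rw [hA, hB]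
  simp

-- ===== VERDICT (by name: the statement is the Claim_ definition above) =====
theorem validate_state_spec : Claim_unchanged_validate_state := by
  intro state godmode _ hpre hD
  exact main_equiv state godmode hpre hD

theorem validate_state_changed : Claim_changed_validate_state := by
  unfold Claim_changed_validate_state; decide

theorem validate_state_tight : Claim_exact_validate_state := by
  intro state godmode _ hpre hD
  exact exact_diff state godmode hpre hD

def validate_state_raises : Claim_raises_validate_state := by
  unfold Claim_raises_validate_state
  refine ⟨?_, by decide⟩
  intro state godmode _ hr ⟨l, hl, hne⟩
  exact hne (hr l hl)
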